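-- pv_equiv track=rewrite | github.com/Luminoid/plantfolio-common-plants | scripts/optimize_duplicate_typenames.py | find_duplicate_typenames
-- ===== SOURCE A (Python) =====
-- from collections import defaultdict
--
-- def find_duplicate_typenames(data: list) -> dict[str, list[dict]]:
--     """Return {typeName: [entries]} for typeNames that appear more than once."""
--     by_tn = defaultdict(list)
--     for e in data:
--         if isinstance(e, dict) and "_metadata" not in e and "typeName" in e:
--             tn = (e.get("typeName") or "").strip()
--             if tn:
--                 by_tn[tn].append(e)
--     return {k: v for k, v in by_tn.items() if len(v) > 1}
-- ===== SOURCE B (Python) =====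
-- def find_duplicate_typenames(data: list) -> dict[str, list[dict]]:
--     """Return {typeName: [entries]} for typeNames that appear more than once."""
--     def key_of(e):
--         if not (isinstance(e, dict) and "_metadata" not in e and "typeName" in e):
--             return None
--         tn = (e.get("typeName") or "").strip()
--         return tn if tn else None
--
--     keyed = [(key_of(e), e) for e in data]
--     result = {}
--     for k, _ in keyed:
--         if k is not None and k not in result:
--             grp = [e for k2, e in keyed if k2 == k]
--             if len(grp) > 1:
--                 result[k] = grp
--     return result
-- ===== Notes on version B (the rewrite author's own statement) =====
-- stated objective: alternative
-- what changed: Instead of accumulating every group in a defaultdict and filtering by length afterwards, B precomputes each entry's cleaned key once, then at each key's first occurrence gathers its group by a direct scan and stores it only if it has more than one member.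
import Mathlib
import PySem

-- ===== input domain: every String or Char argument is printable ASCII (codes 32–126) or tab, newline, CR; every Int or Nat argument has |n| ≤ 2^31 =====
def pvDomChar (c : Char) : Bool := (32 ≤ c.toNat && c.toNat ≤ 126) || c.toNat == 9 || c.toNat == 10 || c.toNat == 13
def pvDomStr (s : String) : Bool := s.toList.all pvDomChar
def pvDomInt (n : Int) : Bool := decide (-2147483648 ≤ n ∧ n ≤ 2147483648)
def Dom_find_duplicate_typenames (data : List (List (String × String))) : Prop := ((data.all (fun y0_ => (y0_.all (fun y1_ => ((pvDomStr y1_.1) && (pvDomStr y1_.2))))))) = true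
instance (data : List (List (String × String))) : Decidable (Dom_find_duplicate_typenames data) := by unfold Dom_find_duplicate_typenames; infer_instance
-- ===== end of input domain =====

-- B replaces A's defaultdict-grouping-then-filter with: clean each key once, then at a key's
-- first occurrence gather its group by a direct scan and keep it only when it has >1 member
-- (alternative decomposition, not claimed faster).

-- ===== PORT A =====
def find_duplicate_typenames (data : List (List (String × String))) : List (String × List (List (String × String))) :=
  let by_tn := data.foldl (fun d e =>
    if !(PySem.Dict.mk e).contains "_metadata" && (PySem.Dict.mk e).contains "typeName" then
      let tn := PySem.Str.strip (((PySem.Dict.mk e).get? "typeName").getD "")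
      if tn ≠ "" then d.modify tn [] (· ++ [e]) else d
    else d) PySem.Dict.empty
  by_tn.items.filter (fun kv => 1 < kv.2.length)

-- ===== PORT B =====
def key_of (e : List (String × String)) : Option String :=
  if !(!(PySem.Dict.mk e).contains "_metadata" && (PySem.Dict.mk e).contains "typeName") then none
  else
    let tn := PySem.Str.strip (((PySem.Dict.mk e).get? "typeName").getD "")
    if tn ≠ "" then some tn else none

def find_duplicate_typenames_alt (data : List (List (String × String))) : List (String × List (List (String × String))) :=
  let keyed := data.map (fun e => (key_of e, e))
  let result := keyed.foldl (fun r p =>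
    match p.1 with
    | none => r
    | some k =>
      if !r.contains k then
        let grp := (keyed.filter (fun q => q.1 == some k)).map (·.2)
        if 1 < grp.length then r.insert k grp else r
      else r) PySem.Dict.empty
  result.items

-- ===== PRECONDITION & SPEC =====
def Spec_find_duplicate_typenames (data : List (List (String × String))) (out : List (String × List (List (String × String)))) : Prop := out = find_duplicate_typenames_alt data
instance (data : List (List (String × String))) (out : List (String × List (List (String × String)))) : Decidable (Spec_find_duplicate_typenames data out) := by unfold Spec_find_duplicate_typenames; infer_instance

-- ===== CLAIM (what is proved, stated in full; the proofs are below) =====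
def Claim_equal_find_duplicate_typenames : Prop := ∀ (data : List (List (String × String))), Dom_find_duplicate_typenames data → Spec_find_duplicate_typenames data (find_duplicate_typenames data)

-- ===== LEMMAS AND PROOFS =====

-- A's loop body, as a match on the cleaned key.
theorem A_step (d : PySem.Dict String (List (List (String × String)))) (e : List (String × String)) :
    (if !(PySem.Dict.mk e).contains "_metadata" && (PySem.Dict.mk e).contains "typeName" then
      let tn := PySem.Str.strip (((PySem.Dict.mk e).get? "typeName").getD "")
      if tn ≠ "" then d.modify tn [] (· ++ [e]) else d
    else d)
    = (match key_of e with
       | none => d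
       | some k => d.modify k [] (· ++ [e])) := by
  unfold key_of
  generalize (!(PySem.Dict.mk e).contains "_metadata" && (PySem.Dict.mk e).contains "typeName") = c
  cases c with
  | false => simp
  | true =>
    by_cases h2 : PySem.Str.strip (((PySem.Dict.mk e).get? "typeName").getD "") = ""
    · simp [h2]
    · simp [h2]
-- A's fold, re-expressed over the keyed pair list.
theorem A_fold_eq (data : List (List (String × String)))
    (d : PySem.Dict String (List (List (String × String)))) :
    data.foldl (fun d e =>
      if !(PySem.Dict.mk e).contains "_metadata" && (PySem.Dict.mk e).contains "typeName" then
        let tn := PySem.Str.strip (((PySem.Dict.mk e).get? "typeName").getD "")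
        if tn ≠ "" then d.modify tn [] (· ++ [e]) else d
      else d) d
    = (data.filterMap (fun e => (key_of e).map (fun k => (k, e)))).foldl
        (fun d p => d.modify p.1 [] (· ++ [p.2])) d := by
  induction data generalizing d with
  | nil => rfl
  | cons e rest ih =>
    simp only [A_step] at ih ⊢
    simp only [List.foldl_cons, List.filterMap_cons]
    cases h : key_of e with
    | none => simp only [h, Option.map_none]; exact ih d
    | some k => simp only [h, Option.map_some, List.foldl_cons]; exact ih _

theorem keyed_filter_snd (data : List (List (String × String))) (k : String) :
    (((data.map (fun e => (key_of e, e))).filter (fun q => q.1 == some k)).map (·.2))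
    = ((data.filterMap (fun e => (key_of e).map (fun k' => (k', e)))).filter
        (fun p => p.1 == k)).map (·.2) := by
  induction data with
  | nil => rfl
  | cons e rest ih =>
    simp only [List.map_cons, List.filterMap_cons]
    cases h : key_of e with
    | none => simpa [List.filter_cons, h] using ih
    | some k' =>
      by_cases hk : k' = k
      · simp [List.filter_cons, h, hk, ih]
      · simp [List.filter_cons, h, hk, ih]

-- filtering a Set past a discarded element the predicate rejects
theorem filter_discard {p : String → Bool} (s : PySem.Set String) (k : String)
    (hp : p k = false) : (PySem.Set.discard s k).filter p = s.filter p := by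
  show (s.filter fun y => !(y == k)).filter p = s.filter p
  rw [List.filter_filter]
  exact List.filter_congr (fun y _ => by by_cases h : y = k <;> simp [h, hp])

-- B's fold characterised: it appends, in first-occurrence order, the not-yet-present keys
-- whose (fixed) group G has more than one member.
theorem B_fold_char (G : String → List (List (String × String)))
    (ps : List (Option String × List (String × String)))
    (r : PySem.Dict String (List (List (String × String)))) (hr : r.keys.Nodup) :
    (ps.foldl (fun r p =>
      match p.1 with
      | none => r
      | some k =>
        if !r.contains k then
          if 1 < (G k).length then r.insert k (G k) else r
        else r) r).items
    = r.items ++ ((PySem.Set.ofList (ps.filterMap (·.1))).filter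
        (fun k => !r.contains k && decide (1 < (G k).length))).map (fun k => (k, G k)) := by
  induction ps generalizing r with
  | nil => simp [PySem.Set.ofList]
  | cons p rest ih =>
    obtain ⟨k?, e⟩ := p
    cases k? with
    | none =>
      simp only [List.foldl_cons, List.filterMap_cons]
      exact ih r hr
    | some k =>
      simp only [List.foldl_cons, List.filterMap_cons, PySem.Set.ofList_cons,
        List.filter_cons]
      by_cases hc : r.contains k = true
      · simp only [hc, Bool.not_true, Bool.false_and, Bool.false_eq_true, if_false]
        rw [ih r hr, filter_discard _ k (by simp [hc])]
      · have hc' : r.contains k = false := by simpa using hc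
        by_cases hg : 1 < (G k).length
        · simp only [hc', Bool.not_false, if_true, hg, decide_true, Bool.true_and,
            Bool.and_true, if_pos]
          rw [ih (r.insert k (G k)) (PySem.Dict.nodup_keys_insert _ _ _ hr),
            PySem.Dict.items_insert_of_not_contains _ _ hc']
          simp only [List.map_cons, List.append_assoc, List.cons_append, List.nil_append]
          refine congrArg (r.items ++ ·) ?_
          have hdis : (PySem.Set.discard (PySem.Set.ofList (rest.filterMap (·.1))) k)
              = (PySem.Set.ofList (rest.filterMap (·.1))).filter (fun y => !(y == k)) := rfl
          rw [hdis, List.filter_filter]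
          refine congrArg (List.cons _) (congrArg _ (List.filter_congr (fun y _ => by
            by_cases h : y = k <;>
              simp [h, PySem.Dict.contains_insert, hc', Bool.and_comm, Bool.and_assoc, Bool.and_left_comm])))
        · have hg' : decide (1 < (G k).length) = false := by simpa using hg
          simp only [hc', Bool.not_false, if_true, hg', Bool.and_false,
            Bool.false_eq_true, if_false, if_neg hg]
          rw [ih r hr, filter_discard _ k (by simp [hg'])]

theorem keyed_fst (data : List (List (String × String))) :
    (data.map (fun e => (key_of e, e))).filterMap (·.1) = data.filterMap key_of := by
  induction data with
  | nil => rfl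
  | cons e rest ih => cases h : key_of e <;> simp [h, ih]

theorem pairs_fst (data : List (List (String × String))) :
    (data.filterMap (fun e => (key_of e).map (fun k => (k, e)))).map (·.1)
    = data.filterMap key_of := by
  induction data with
  | nil => rfl
  | cons e rest ih => cases h : key_of e <;> simp [h, ih]

-- ===== VERDICT (by name: the statement is the Claim_ definition above) =====
theorem find_duplicate_typenames_spec : Claim_equal_find_duplicate_typenames := by
  intro data _
  unfold Spec_find_duplicate_typenames
  have hG : ∀ k, (((data.map (fun e => (key_of e, e))).filter
      (fun q => q.1 == some k)).map (·.2))
      = ((data.filterMap (fun e => (key_of e).map (fun k' => (k', e)))).filter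
        (fun p => p.1 == k)).map (·.2) := keyed_filter_snd data
  -- A's side, brought to normal form
  have hA : find_duplicate_typenames data
      = ((PySem.Set.ofList (data.filterMap key_of)).filter
          (fun k => decide (1 < (((data.filterMap (fun e => (key_of e).map (fun k' => (k', e)))).filter
            (fun p => p.1 == k)).map (·.2)).length))).map
          (fun k => (k, ((data.filterMap (fun e => (key_of e).map (fun k' => (k', e)))).filter
            (fun p => p.1 == k)).map (·.2))) := by
    have h0 : find_duplicate_typenames data
        = ((data.foldl (fun d e =>
            if !(PySem.Dict.mk e).contains "_metadata" && (PySem.Dict.mk e).contains "typeName" then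
              let tn := PySem.Str.strip (((PySem.Dict.mk e).get? "typeName").getD "")
              if tn ≠ "" then d.modify tn [] (· ++ [e]) else d
            else d) PySem.Dict.empty).items).filter (fun kv => 1 < kv.2.length) := rfl
    rw [h0, A_fold_eq]
    have hnd := PySem.Dict.nodup_keys_foldl_modify_key
      (data.filterMap (fun e => (key_of e).map (fun k => (k, e)))) (·.1) []
      (fun _ p => (· ++ [p.2])) PySem.Dict.empty PySem.Dict.nodup_keys_empty
    rw [PySem.Dict.items_eq_map_keys _ hnd []]
    simp only [PySem.Dict.keys_foldl_modify_key, PySem.Dict.keys_empty,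
      PySem.Set.update_nil_left, pairs_fst, PySem.Dict.getD_foldl_modify_append,
      PySem.Dict.getD_empty, List.nil_append, List.filter_map, Function.comp]
    rfl
  -- B's side, brought to the same normal form
  have hB0 : find_duplicate_typenames_alt data
      = ((data.map (fun e => (key_of e, e))).foldl (fun r p =>
          match p.1 with
          | none => r
          | some k =>
            if !r.contains k then
              if 1 < ((((data.map (fun e => (key_of e, e))).filter
                  (fun q => q.1 == some k)).map (·.2))).length
              then r.insert k (((data.map (fun e => (key_of e, e))).filter
                  (fun q => q.1 == some k)).map (·.2))
              else r
            else r) PySem.Dict.empty).items := rfl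
  have hB := B_fold_char
    (fun k => ((data.map (fun e => (key_of e, e))).filter (fun q => q.1 == some k)).map (·.2))
    (data.map (fun e => (key_of e, e))) PySem.Dict.empty PySem.Dict.nodup_keys_empty
  rw [hA, hB0, hB, keyed_fst]
  simp only [PySem.Dict.contains_empty, Bool.not_false, Bool.true_and]
  have : PySem.Dict.empty.items
      = ([] : List (String × List (List (String × String)))) := rfl
  rw [this, List.nil_append]
  simp only [hG]
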